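-- pv_equiv track=rewrite | github.com/MdAminourIslam/LeetCode-Solutions | 1855/Main.py | maxDistance
-- ===== SOURCE A (Python) =====
-- def maxDistance(nums1, nums2):
--     """
--     :type nums1: List[int]
--     :type nums2: List[int]
--     :rtype: int
--     """
--
--     i = j = ans = 0
--
--     while i < len(nums1):
--         while j < len(nums2) and nums2[j] >= nums1[i]:
--             j += 1
--
--         if j >= i:
--             ans = max(ans, j - i - 1)
--
--         i += 1
--
--     return ans
-- ===== SOURCE B (Python) =====
-- def maxDistance(nums1, nums2):
--     # prefix minima of nums2: pmin[m] = min(nums2[0..m]); non-increasing by construction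
--     pmin = []
--     cur = None
--     for v in nums2:
--         cur = v if cur is None or v < cur else cur
--         pmin.append(cur)
--     ans = 0
--     for i in range(len(nums1)):
--         # binary search: first index lo with pmin[lo] < nums1[i]
--         lo, hi = 0, len(pmin)
--         while lo < hi:
--             mid = (lo + hi) // 2
--             if pmin[mid] < nums1[i]:
--                 hi = mid
--             else:
--                 lo = mid + 1
--         if lo >= i:
--             ans = max(ans, lo - i - 1)
--     return ans
-- ===== Notes on version B (the rewrite author's own statement) =====
-- stated objective: alternative
-- what changed: Replaces the persistent two-pointer scan with a prefix-minimum array of nums2 plus an independent binary search per nums1 index for the first position whose prefix minimum drops below nums1[i]; the running shared pointer disappears entirely.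
import Mathlib
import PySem

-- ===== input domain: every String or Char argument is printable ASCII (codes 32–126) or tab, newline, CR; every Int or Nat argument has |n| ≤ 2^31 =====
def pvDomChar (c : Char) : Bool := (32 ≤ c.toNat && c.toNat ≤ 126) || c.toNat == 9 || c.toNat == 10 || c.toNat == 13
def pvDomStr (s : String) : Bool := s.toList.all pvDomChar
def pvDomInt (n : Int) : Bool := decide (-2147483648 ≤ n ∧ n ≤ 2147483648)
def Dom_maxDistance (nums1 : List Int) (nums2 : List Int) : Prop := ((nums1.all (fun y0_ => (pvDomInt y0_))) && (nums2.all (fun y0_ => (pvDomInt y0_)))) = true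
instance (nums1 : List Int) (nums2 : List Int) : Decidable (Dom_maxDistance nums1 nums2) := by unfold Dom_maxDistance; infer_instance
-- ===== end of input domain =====

-- B replaces A's persistent two-pointer scan by a prefix-minimum array of nums2 and an
-- independent binary search per nums1 index (objective: alternative algorithm, same results).

-- ===== PORT A =====
-- inner `while j < len(nums2) and nums2[j] >= nums1[i]: j += 1`
def pvAInnerF (nums2 : List Int) (x : Int) : Nat → Nat → Nat
  | 0, j => j
  | fuel + 1, j =>
    if h : j < nums2.length then
      if nums2[j] ≥ x then pvAInnerF nums2 x fuel (j + 1) else j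
    else j

def pvAInner (nums2 : List Int) (x : Int) (j : Nat) : Nat :=
  pvAInnerF nums2 x (nums2.length - j) j

-- outer `while i < len(nums1)` carrying the state (j, ans)
def pvAOuterF (nums1 nums2 : List Int) : Nat → Nat → Nat → Int → Int
  | 0, _, _, ans => ans
  | fuel + 1, i, j, ans =>
    if h : i < nums1.length then
      pvAOuterF nums1 nums2 fuel (i + 1) (pvAInner nums2 nums1[i] j)
        (if ((pvAInner nums2 nums1[i] j : Int)) ≥ (i : Int)
         then max ans ((pvAInner nums2 nums1[i] j : Int) - (i : Int) - 1) else ans)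
    else ans

def pvAOuter (nums1 nums2 : List Int) (i j : Nat) (ans : Int) : Int :=
  pvAOuterF nums1 nums2 (nums1.length - i) i j ans

def maxDistance (nums1 : List Int) (nums2 : List Int) : Int :=
  pvAOuter nums1 nums2 0 0 0

-- ===== PORT B =====
-- the `for v in nums2` loop building the prefix-minimum list
def pvPminList (nums2 : List Int) : List Int :=
  (nums2.foldl
    (fun (st : Option Int × List Int) v =>
      let cur := match st.1 with
        | none => v
        | some c => if v < c then v else c
      (some cur, st.2 ++ [cur]))
    (none, [])).2

-- `while lo < hi` binary search for the first index with pmin[mid] < x (mid = (lo+hi)//2 inlined)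
def pvBsearchF (pmin : List Int) (x : Int) : Nat → Nat → Nat → Nat
  | 0, lo, _ => lo
  | fuel + 1, lo, hi =>
    if h : lo < hi then
      if pmin[(lo + hi) / 2]! < x then pvBsearchF pmin x fuel lo ((lo + hi) / 2)
      else pvBsearchF pmin x fuel ((lo + hi) / 2 + 1) hi
    else lo

def pvBsearch (pmin : List Int) (x : Int) (lo hi : Nat) : Nat :=
  pvBsearchF pmin x (hi - lo) lo hi

-- `for i in range(len(nums1))` loop
def pvBLoopF (nums1 : List Int) (pmin : List Int) : Nat → Nat → Int → Int
  | 0, _, ans => ans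
  | fuel + 1, i, ans =>
    if h : i < nums1.length then
      pvBLoopF nums1 pmin fuel (i + 1)
        (if ((pvBsearch pmin nums1[i] 0 pmin.length : Int)) ≥ (i : Int)
         then max ans ((pvBsearch pmin nums1[i] 0 pmin.length : Int) - (i : Int) - 1) else ans)
    else ans

def pvBLoop (nums1 : List Int) (pmin : List Int) (i : Nat) (ans : Int) : Int :=
  pvBLoopF nums1 pmin (nums1.length - i) i ans

def maxDistance_alt (nums1 : List Int) (nums2 : List Int) : Int :=
  pvBLoop nums1 (pvPminList nums2) 0 0

-- ===== PRECONDITION & SPEC =====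
def Spec_maxDistance (nums1 : List Int) (nums2 : List Int) (out : Int) : Prop := out = maxDistance_alt nums1 nums2
instance (nums1 : List Int) (nums2 : List Int) (out : Int) : Decidable (Spec_maxDistance nums1 nums2 out) := by unfold Spec_maxDistance; infer_instance

-- ===== CLAIM (what is proved, stated in full; the proofs are below) =====
def Claim_equal_maxDistance : Prop := ∀ (nums1 : List Int) (nums2 : List Int), Dom_maxDistance nums1 nums2 → Spec_maxDistance nums1 nums2 (maxDistance nums1 nums2)

-- ===== LEMMAS AND PROOFS =====

-- step (unfolding) equations for the fuel-guarded loops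
theorem pvAInner_eq (nums2 : List Int) (x : Int) (j : Nat) :
    pvAInner nums2 x j =
      if h : j < nums2.length then
        (if nums2[j] ≥ x then pvAInner nums2 x (j + 1) else j)
      else j := by
  unfold pvAInner
  by_cases h : j < nums2.length
  · have hf : nums2.length - j = (nums2.length - (j + 1)) + 1 := by omega
    rw [hf]
    simp [pvAInnerF, h]
  · have hf : nums2.length - j = 0 := by omega
    rw [hf]
    simp [pvAInnerF, h]

theorem pvAOuter_eq (nums1 nums2 : List Int) (i j : Nat) (ans : Int) :
    pvAOuter nums1 nums2 i j ans =
      if h : i < nums1.length then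
        pvAOuter nums1 nums2 (i + 1) (pvAInner nums2 nums1[i] j)
          (if ((pvAInner nums2 nums1[i] j : Int)) ≥ (i : Int)
           then max ans ((pvAInner nums2 nums1[i] j : Int) - (i : Int) - 1) else ans)
      else ans := by
  unfold pvAOuter
  by_cases h : i < nums1.length
  · have hf : nums1.length - i = (nums1.length - (i + 1)) + 1 := by omega
    rw [hf]
    simp [pvAOuterF, h]
  · have hf : nums1.length - i = 0 := by omega
    rw [hf]
    simp [pvAOuterF, h]

theorem pvBsearchF_irrel (pmin : List Int) (x : Int) :
    ∀ f1 f2 lo hi, hi - lo ≤ f1 → hi - lo ≤ f2 →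
      pvBsearchF pmin x f1 lo hi = pvBsearchF pmin x f2 lo hi := by
  intro f1
  induction f1 with
  | zero =>
    intro f2 lo hi h1 h2
    have hle : ¬ lo < hi := by omega
    cases f2 <;> simp [pvBsearchF, hle]
  | succ g1 ih =>
    intro f2 lo hi h1 h2
    by_cases hlt : lo < hi
    · obtain ⟨g2, rfl⟩ : ∃ g2, f2 = g2 + 1 := ⟨f2 - 1, by omega⟩
      simp only [pvBsearchF, hlt, dif_pos]
      split
      · exact ih g2 lo ((lo + hi) / 2) (by omega) (by omega)
      · exact ih g2 ((lo + hi) / 2 + 1) hi (by omega) (by omega)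
    · cases f2 <;> simp [pvBsearchF, hlt]

theorem pvBsearch_eq (pmin : List Int) (x : Int) (lo hi : Nat) :
    pvBsearch pmin x lo hi =
      if h : lo < hi then
        (if pmin[(lo + hi) / 2]! < x then pvBsearch pmin x lo ((lo + hi) / 2)
         else pvBsearch pmin x ((lo + hi) / 2 + 1) hi)
      else lo := by
  unfold pvBsearch
  by_cases h : lo < hi
  · have hf : hi - lo = (hi - lo - 1) + 1 := by omega
    rw [hf]
    simp only [pvBsearchF, h, dif_pos]
    split
    · exact pvBsearchF_irrel pmin x (hi - lo - 1) ((lo + hi) / 2 - lo) lo ((lo + hi) / 2) (by omega) (by omega)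
    · exact pvBsearchF_irrel pmin x (hi - lo - 1) (hi - ((lo + hi) / 2 + 1)) ((lo + hi) / 2 + 1) hi (by omega) (by omega)
  · have hf : hi - lo = 0 := by omega
    rw [hf]
    simp [pvBsearchF, h]

theorem pvBLoop_eq (nums1 pmin : List Int) (i : Nat) (ans : Int) :
    pvBLoop nums1 pmin i ans =
      if h : i < nums1.length then
        pvBLoop nums1 pmin (i + 1)
          (if ((pvBsearch pmin nums1[i] 0 pmin.length : Int)) ≥ (i : Int)
           then max ans ((pvBsearch pmin nums1[i] 0 pmin.length : Int) - (i : Int) - 1) else ans)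
      else ans := by
  unfold pvBLoop
  by_cases h : i < nums1.length
  · have hf : nums1.length - i = (nums1.length - (i + 1)) + 1 := by omega
    rw [hf]
    simp [pvBLoopF, h]
  · have hf : nums1.length - i = 0 := by omega
    rw [hf]
    simp [pvBLoopF, h]

-- mathematical first-failure index: first j with l[j] < x, l.length if none
def pvG (l : List Int) (x : Int) : Nat :=
  match l with
  | [] => 0
  | v :: t => if v < x then 0 else pvG t x + 1

-- clean recursive prefix-minimum
def pvPminOf (l : List Int) : List Int :=
  match l with
  | [] => []
  | v :: t => v :: (pvPminOf t).map (min v)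

theorem pvG_le_length (l : List Int) (x : Int) : pvG l x ≤ l.length := by
  induction l with
  | nil => simp [pvG]
  | cons v t ih => simp only [pvG, List.length_cons]; split <;> omega

theorem pvG_ge (l : List Int) (x : Int) (m : Nat) (hm : m < l.length) (h : m < pvG l x) :
    x ≤ l[m] := by
  induction l generalizing m with
  | nil => simp at hm
  | cons v t ih =>
    simp only [pvG] at h
    split at h
    · omega
    · cases m with
      | zero => simpa using le_of_not_gt (by assumption)
      | succ m => exact ih m (by simpa using hm) (by omega)

theorem pvG_lt (l : List Int) (x : Int) (j : Nat) (hj : j < l.length) (he : pvG l x = j) :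
    l[j] < x := by
  subst he
  induction l with
  | nil => simp at hj
  | cons v t ih =>
    by_cases hv : v < x
    · simpa [pvG, hv] using hv
    · have h' : pvG t x < t.length := by
        simp only [pvG, hv, if_neg, List.length_cons] at hj
        simp at hj
        omega
      simpa [pvG, hv] using ih h'

theorem pvG_le_of_lt (l : List Int) (x : Int) (m : Nat) (hm : m < l.length) (h : l[m] < x) :
    pvG l x ≤ m := by
  by_contra hc
  exact absurd h (not_lt.mpr (pvG_ge l x m hm (by omega)))

theorem pvPminOf_length (l : List Int) : (pvPminOf l).length = l.length := by
  induction l with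
  | nil => rfl
  | cons v t ih => simp [pvPminOf, ih]

theorem pvPminOf_lt_iff (l : List Int) (x : Int) (m : Nat) (hm : m < l.length) :
    ((pvPminOf l)[m]'(by rw [pvPminOf_length]; exact hm) < x ↔ pvG l x ≤ m) := by
  induction l generalizing m with
  | nil => simp at hm
  | cons v t ih =>
    cases m with
    | zero =>
      simp only [pvPminOf, pvG, List.getElem_cons_zero]
      split
      · simpa using ‹v < x›
      · simp; omega
    | succ m =>
      have hm' : m < t.length := by simpa using hm
      have hmap : (pvPminOf (v :: t))[m + 1]'(by rw [pvPminOf_length]; simpa using hm)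
          = min v ((pvPminOf t)[m]'(by rw [pvPminOf_length]; exact hm')) := by
        simp [pvPminOf]
      rw [hmap]
      simp only [pvG]
      rw [min_lt_iff]
      split
      · simp [‹v < x›]
      · have hiff := ih m hm'
        constructor
        · intro hor
          rcases hor with h1 | h2
          · exact absurd h1 ‹¬ v < x›
          · have := hiff.mp h2
            omega
        · intro hle
          right
          exact hiff.mpr (by omega)

theorem pvPminList_foldl (l : List Int) (c : Int) (acc : List Int) :
    (l.foldl
      (fun (st : Option Int × List Int) v =>
        let cur := match st.1 with
          | none => v
          | some c => if v < c then v else c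
        (some cur, st.2 ++ [cur]))
      (some c, acc)).2 = acc ++ (pvPminOf l).map (min c) := by
  induction l generalizing c acc with
  | nil => simp [pvPminOf]
  | cons v t ih =>
    simp only [List.foldl_cons, pvPminOf]
    have hcur : (if v < c then v else c) = min c v := by
      rcases lt_or_ge v c with h | h
      · simp [h, min_eq_right (le_of_lt h)]
      · simp [not_lt.mpr h, min_eq_left h]
    simp only [hcur]
    rw [ih]
    simp [List.map_map, Function.comp, List.append_assoc]

theorem pvPminList_eq (l : List Int) : pvPminList l = pvPminOf l := by
  cases l with
  | nil => rfl
  | cons v t =>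
    unfold pvPminList
    simp only [List.foldl_cons]
    rw [pvPminList_foldl]
    simp [pvPminOf]

-- binary search returns pvG
theorem pvBsearch_char (nums2 : List Int) (x : Int) (lo hi : Nat)
    (hlo : ∀ m, m < lo → (hm : m < nums2.length) →
      ¬ ((pvPminOf nums2)[m]'(by rw [pvPminOf_length]; exact hm) < x))
    (hhi : ∀ m, hi ≤ m → (hm : m < nums2.length) →
      (pvPminOf nums2)[m]'(by rw [pvPminOf_length]; exact hm) < x)
    (hle : lo ≤ hi) (hlen : hi ≤ nums2.length) :
    pvBsearch (pvPminOf nums2) x lo hi = pvG nums2 x := by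
  induction hwf : hi - lo using Nat.strong_induction_on generalizing lo hi with
  | _ n ih =>
    rw [pvBsearch_eq]
    split
    · rename_i h
      have hmid : (lo + hi) / 2 < nums2.length := by omega
      have hmid' : (lo + hi) / 2 < (pvPminOf nums2).length := by rw [pvPminOf_length]; exact hmid
      rw [getElem!_pos (pvPminOf nums2) ((lo + hi) / 2) hmid']
      split
      · rename_i hp
        exact ih (((lo + hi) / 2) - lo) (by omega) lo ((lo + hi) / 2) hlo
          (fun m hm hmlt => by
            have hg := (pvPminOf_lt_iff nums2 x ((lo + hi) / 2) hmid).mp hp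
            exact (pvPminOf_lt_iff nums2 x m hmlt).mpr (by omega))
          (by omega) (by omega) rfl
      · rename_i hp
        exact ih (hi - ((lo + hi) / 2 + 1)) (by omega) ((lo + hi) / 2 + 1) hi
          (fun m hm hmlt hc => by
            have hg := (pvPminOf_lt_iff nums2 x m hmlt).mp hc
            rcases Nat.lt_or_ge m lo with h1 | h1
            · exact hlo m h1 hmlt hc
            · exact hp ((pvPminOf_lt_iff nums2 x ((lo + hi) / 2) hmid).mpr (by omega)))
          hhi (by omega) hlen rfl
    · rename_i h
      have h1 : lo ≤ pvG nums2 x := by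
        by_contra hc
        push_neg at hc
        have hglt : pvG nums2 x < nums2.length := by
          have := pvG_le_length nums2 x
          omega
        exact hlo (pvG nums2 x) hc hglt ((pvPminOf_lt_iff nums2 x _ hglt).mpr le_rfl)
      have h2 : pvG nums2 x ≤ lo := by
        rcases Nat.lt_or_ge lo nums2.length with h3 | h3
        · exact (pvPminOf_lt_iff nums2 x lo h3).mp (hhi lo (by omega) h3)
        · have := pvG_le_length nums2 x
          omega
      omega

theorem pvBsearch_eq_pvG (nums2 : List Int) (x : Int) :
    pvBsearch (pvPminList nums2) x 0 (pvPminList nums2).length = pvG nums2 x := by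
  rw [pvPminList_eq, pvPminOf_length]
  exact pvBsearch_char nums2 x 0 nums2.length
    (fun m hm _ => absurd hm (by omega))
    (fun m hm hmlt => absurd hmlt (by omega)) (by omega) le_rfl

-- A's inner scan equals pvG when started at or below it
theorem pvAInner_eq_pvG (nums2 : List Int) (x : Int) (j : Nat) (h : j ≤ pvG nums2 x) :
    pvAInner nums2 x j = pvG nums2 x := by
  induction hwf : nums2.length - j using Nat.strong_induction_on generalizing j with
  | _ n ih =>
    rw [pvAInner_eq]
    split
    · rename_i hj
      split
      · rename_i hx
        have hne : j ≠ pvG nums2 x := by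
          intro heq
          exact absurd (pvG_lt nums2 x j hj heq.symm) (not_lt.mpr hx)
        exact ih (nums2.length - (j + 1)) (by omega) (j + 1) (by omega) rfl
      · rename_i hx
        have := pvG_le_of_lt nums2 x j hj (by omega)
        omega
    · rename_i hj
      have := pvG_le_length nums2 x
      omega

-- the state invariant A's pointer maintains: nums2[j] is strictly below every earlier element
def pvInv (nums2 : List Int) (j : Nat) : Prop :=
  j ≤ nums2.length ∧ ∀ m, (hm : m < j) → (hj : j < nums2.length) → nums2[j] < nums2[m]'(by omega)

theorem pvAInner_char (nums2 : List Int) (x : Int) (j : Nat) (hinv : pvInv nums2 j) :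
    pvAInner nums2 x j = max j (pvG nums2 x) := by
  by_cases h : j ≤ pvG nums2 x
  · rw [pvAInner_eq_pvG nums2 x j h, Nat.max_eq_right h]
  · rw [not_le] at h
    rw [Nat.max_eq_left (le_of_lt h)]
    have hg : pvG nums2 x < nums2.length := by
      have := hinv.1; omega
    have hgx : nums2[pvG nums2 x]'hg < x := pvG_lt nums2 x _ hg rfl
    rw [pvAInner_eq]
    split
    · rename_i hj
      have h1 : nums2[j] < nums2[pvG nums2 x]'hg := hinv.2 (pvG nums2 x) h hj
      have h2 : nums2[j] < x := lt_trans h1 hgx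
      simp [not_le.mpr h2]
    · rfl

theorem pvInv_step (nums2 : List Int) (x : Int) (j : Nat) (hinv : pvInv nums2 j) :
    pvInv nums2 (max j (pvG nums2 x)) := by
  by_cases h : j ≤ pvG nums2 x
  · rw [Nat.max_eq_right h]
    refine ⟨pvG_le_length nums2 x, fun m hm hj => ?_⟩
    have hmlen : m < nums2.length := Nat.lt_trans hm hj
    have hmx : x ≤ nums2[m]'hmlen := pvG_ge nums2 x m hmlen hm
    exact lt_of_lt_of_le (pvG_lt nums2 x _ hj rfl) hmx
  · rw [not_le] at h
    rw [Nat.max_eq_left (le_of_lt h)]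
    exact hinv

-- main loop correspondence: A's (i, j, ans) state vs B's (i, ans) state
theorem pvOuter_eq (nums1 nums2 : List Int) (i j : Nat) (ans : Int)
    (hinv : pvInv nums2 j) (hans0 : 0 ≤ ans) (hansj : (j : Int) - (i : Int) ≤ ans) :
    pvAOuter nums1 nums2 i j ans = pvBLoop nums1 (pvPminList nums2) i ans := by
  induction hwf : nums1.length - i using Nat.strong_induction_on generalizing i j ans with
  | _ n ih =>
    rw [pvAOuter_eq, pvBLoop_eq]
    split
    · rename_i hi
      rw [pvBsearch_eq_pvG nums2 nums1[i], pvAInner_char nums2 nums1[i] j hinv]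
      have hstep := pvInv_step nums2 nums1[i] j hinv
      by_cases h : j ≤ pvG nums2 nums1[i]
      · rw [Nat.max_eq_right h] at hstep ⊢
        apply ih (nums1.length - (i + 1)) (by omega) (i + 1) (pvG nums2 nums1[i]) _ hstep
        · split
          · exact le_max_of_le_left hans0
          · exact hans0
        · split
          · rename_i hgi
            have := le_max_right ans ((pvG nums2 nums1[i] : Int) - (i : Int) - 1)
            push_cast
            omega
          · rename_i hgi
            push_neg at hgi
            push_cast
            omega
        · rfl
      · rw [not_le] at h
        rw [Nat.max_eq_left (le_of_lt h)] at hstep ⊢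
        have hAans : (if ((j : Int)) ≥ (i : Int)
            then max ans ((j : Int) - (i : Int) - 1) else ans) = ans := by
          split
          · exact max_eq_left (by omega)
          · rfl
        have hBans : (if ((pvG nums2 nums1[i] : Int)) ≥ (i : Int)
            then max ans ((pvG nums2 nums1[i] : Int) - (i : Int) - 1) else ans) = ans := by
          split
          · have hgj : (pvG nums2 nums1[i] : Int) < (j : Int) := by exact_mod_cast h
            exact max_eq_left (by omega)
          · rfl
        rw [hAans, hBans]
        apply ih (nums1.length - (i + 1)) (by omega) (i + 1) j ans hstep hans0 (by push_cast; omega) rfl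
    · rfl

-- ===== VERDICT (by name: the statement is the Claim_ definition above) =====
theorem maxDistance_spec : Claim_equal_maxDistance := by
  intro nums1 nums2 _
  unfold Spec_maxDistance maxDistance maxDistance_alt
  exact pvOuter_eq nums1 nums2 0 0 0 ⟨by omega, fun m hm _ => by omega⟩ le_rfl (by simp)
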